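-- pv_equiv track=rewrite | github.com/metraton/gaia-ops | dist/gaia-ops/tools/scan/scanners/git.py | _determine_primary_platform
-- ===== SOURCE A (Python) =====
-- from typing import Any, Dict, List, Optional, Tuple
--
-- def _determine_primary_platform(
--     remotes: List[Dict[str, Any]],
-- ) -> Optional[str]:
--     """Determine the primary platform from the list of remotes.
--
--     Priority: origin remote first, then first remote with a known platform.
--
--     Args:
--         remotes: List of remote dicts with 'name', 'url', 'platform'.
--
--     Returns:
--         Platform string or None.
--     """
--     if not remotes:
--         return None
--
--     # Prefer origin
--     for remote in remotes:
--         if remote.get("name") == "origin" and remote.get("platform"):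
--             return remote["platform"]
--
--     # Fall back to first remote with a known platform
--     for remote in remotes:
--         if remote.get("platform"):
--             return remote["platform"]
--
--     return None
-- ===== SOURCE B (Python) =====
-- from typing import Any, Dict, List, Optional
--
-- def _determine_primary_platform(
--     remotes: List[Dict[str, Any]],
-- ) -> Optional[str]:
--     """Single pass: origin with a platform wins immediately; otherwise the
--     first remote with a truthy platform is remembered as fallback."""
--     fallback = None
--     for remote in remotes:
--         platform = remote.get("platform")
--         if remote.get("name") == "origin" and platform:
--             return platform
--         if fallback is None and platform:
--             fallback = platform
--     return fallback
-- ===== Notes on version B (the rewrite author's own statement) =====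
-- stated objective: simpler
-- what changed: Replaced A's empty-list guard plus two sequential scans (origin scan, then fallback scan) by one loop that returns immediately on an origin remote with a platform and otherwise remembers the first truthy platform as a fallback.
import Mathlib
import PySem

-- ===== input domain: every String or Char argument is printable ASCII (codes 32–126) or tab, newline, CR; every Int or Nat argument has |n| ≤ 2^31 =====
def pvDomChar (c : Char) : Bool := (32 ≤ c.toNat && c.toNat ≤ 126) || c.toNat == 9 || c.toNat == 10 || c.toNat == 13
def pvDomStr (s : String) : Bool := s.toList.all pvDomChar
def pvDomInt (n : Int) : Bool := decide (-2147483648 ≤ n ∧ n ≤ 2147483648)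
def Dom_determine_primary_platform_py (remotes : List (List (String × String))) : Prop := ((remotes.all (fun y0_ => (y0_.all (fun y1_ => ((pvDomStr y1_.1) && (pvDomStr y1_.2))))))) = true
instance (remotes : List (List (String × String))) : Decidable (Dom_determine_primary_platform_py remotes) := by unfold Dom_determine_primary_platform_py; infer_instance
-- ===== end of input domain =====

-- B merges A's two sequential scans into one pass with a fallback variable (simpler decomposition; same O(n)).
-- ===== PORT A =====
-- Python truthiness of remote.get("platform"): a non-empty string
def pvTruthyOpt : Option String → Bool
  | some s => s != ""
  | none => false

def pvPlatTruthy (r : List (String × String)) : Bool :=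
  pvTruthyOpt ((PySem.Dict.mk r).get? "platform")

-- first loop of A: 'for remote in remotes: if remote.get("name") == "origin" and remote.get("platform"): return remote["platform"]'
def pvAScanOrigin : List (List (String × String)) → Option String
  | [] => none
  | r :: rs =>
    if ((PySem.Dict.mk r).get? "name" == some "origin") && pvPlatTruthy r then
      (PySem.Dict.mk r).get? "platform"
    else pvAScanOrigin rs

-- second loop of A: 'for remote in remotes: if remote.get("platform"): return remote["platform"]'
def pvAScanFirst : List (List (String × String)) → Option String
  | [] => none
  | r :: rs =>
    if pvPlatTruthy r then (PySem.Dict.mk r).get? "platform"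
    else pvAScanFirst rs

def determine_primary_platform_py (remotes : List (List (String × String))) : Option String :=
  if remotes.isEmpty then none
  else
    match pvAScanOrigin remotes with
    | some p => some p
    | none => pvAScanFirst remotes

-- ===== PORT B =====
-- single loop of Source B, carrying the fallback accumulator
def pvBLoop : List (List (String × String)) → Option String → Option String
  | [], fallback => fallback
  | r :: rs, fallback =>
    let platform := (PySem.Dict.mk r).get? "platform"
    let truthy := pvTruthyOpt platform
    if ((PySem.Dict.mk r).get? "name" == some "origin") && truthy then platform
    else pvBLoop rs (if fallback == none && truthy then platform else fallback)

def determine_primary_platform_py_alt (remotes : List (List (String × String))) : Option String :=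
  pvBLoop remotes none

-- ===== PRECONDITION & SPEC =====
def Spec_determine_primary_platform_py (remotes : List (List (String × String))) (out : Option String) : Prop := out = determine_primary_platform_py_alt remotes
instance (remotes : List (List (String × String))) (out : Option String) : Decidable (Spec_determine_primary_platform_py remotes out) := by unfold Spec_determine_primary_platform_py; infer_instance

-- ===== CLAIM (what is proved, stated in full; the proofs are below) =====
def Claim_equal_determine_primary_platform_py : Prop := ∀ (remotes : List (List (String × String))), Dom_determine_primary_platform_py remotes → Spec_determine_primary_platform_py remotes (determine_primary_platform_py remotes)

-- ===== LEMMAS AND PROOFS =====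

-- ===== VERDICT (by name: the statement is the Claim_ definition above) =====
-- one cons step of B's loop vs. A's two scans, with the head remote's fields abstracted
theorem pvStep (nm pf : Option String) (rs : List (List (String × String))) (fb : Option String)
    (ih : ∀ fb, pvBLoop rs fb =
        match pvAScanOrigin rs with
        | some p => some p
        | none => match fb with
                  | some f => some f
                  | none => pvAScanFirst rs) :
    (if ((nm == some "origin") && pvTruthyOpt pf) = true then pf
     else pvBLoop rs (if ((fb == none) && pvTruthyOpt pf) = true then pf else fb)) =
      match (if ((nm == some "origin") && pvTruthyOpt pf) = true then pf else pvAScanOrigin rs) with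
      | some p => some p
      | none => match fb with
                | some f => some f
                | none => if pvTruthyOpt pf = true then pf else pvAScanFirst rs := by
  rcases pf with _ | s
  · simp only [pvTruthyOpt, Bool.and_false, Bool.false_eq_true, if_false]
    rw [ih]
  · by_cases hn : (nm == some "origin") = true
    · by_cases ht : pvTruthyOpt (some s) = true
      · simp [hn, ht]
      · have ht' : pvTruthyOpt (some s) = false := by simpa using ht
        simp only [hn, ht', Bool.and_false, Bool.false_eq_true, if_false]
        rw [ih]
    · have hn' : (nm == some "origin") = false := by simpa using hn
      simp only [hn', Bool.false_and, Bool.false_eq_true, if_false]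
      rw [ih]
      rcases pvAScanOrigin rs with _ | p
      · rcases fb with _ | f
        · by_cases ht : pvTruthyOpt (some s) = true
          · simp [ht]
          · have ht' : pvTruthyOpt (some s) = false := by simpa using ht
            simp [ht']
        · simp
      · simp

-- B's loop, for any fallback accumulator: origin scan wins, then the accumulator, then the first-platform scan
theorem pvBLoop_char (rs : List (List (String × String))) (fb : Option String) :
    pvBLoop rs fb =
      match pvAScanOrigin rs with
      | some p => some p
      | none => match fb with
                | some f => some f
                | none => pvAScanFirst rs := by
  induction rs generalizing fb with
  | nil => cases fb <;> rfl
  | cons r rs ih =>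
    simp only [pvBLoop, pvAScanOrigin, pvAScanFirst, pvPlatTruthy]
    exact pvStep ((PySem.Dict.mk r).get? "name") ((PySem.Dict.mk r).get? "platform") rs fb ih

theorem determine_primary_platform_py_spec : Claim_equal_determine_primary_platform_py := by
  intro remotes _
  unfold Spec_determine_primary_platform_py determine_primary_platform_py determine_primary_platform_py_alt
  rw [pvBLoop_char]
  cases remotes with
  | nil => rfl
  | cons r rs => rfl
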